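-- pv_equiv track=rewrite | github.com/0xDanielSec/duel-framework | engine/detection.py | _csv_split
-- ===== SOURCE A (Python) =====
-- def _csv_split(s: str) -> list[str]:
--     """Split comma-separated list respecting quotes."""
--     parts, buf, in_q, qch = [], [], False, ""
--     for ch in s:
--         if in_q:
--             buf.append(ch)
--             if ch == qch:
--                 in_q = False
--         elif ch in ('"', "'"):
--             in_q, qch = True, ch
--             buf.append(ch)
--         elif ch == ",":
--             parts.append("".join(buf).strip())
--             buf = []
--         else:
--             buf.append(ch)
--     if buf:
--         parts.append("".join(buf).strip())
--     return parts
-- ===== SOURCE B (Python) =====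
-- def _csv_split(s: str) -> list[str]:
--     """Split comma-separated list respecting quotes (two-pass: cut positions, then slices)."""
--     cuts = []
--     in_q, qch = False, ""
--     for i, ch in enumerate(s):
--         if in_q:
--             if ch == qch:
--                 in_q = False
--         elif ch in ('"', "'"):
--             in_q, qch = True, ch
--         elif ch == ",":
--             cuts.append(i)
--     parts = []
--     prev = 0
--     for c in cuts:
--         parts.append(s[prev:c].strip())
--         prev = c + 1
--     last = s[prev:]
--     if last:
--         parts.append(last.strip())
--     return parts
-- ===== Notes on version B (the rewrite author's own statement) =====
-- stated objective: alternative
-- what changed: Instead of accumulating per-field character buffers and flushing them at each comma, B first records the indices of unquoted commas in one scan and then carves the string into slices between those indices, stripping each slice.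
import Mathlib
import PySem

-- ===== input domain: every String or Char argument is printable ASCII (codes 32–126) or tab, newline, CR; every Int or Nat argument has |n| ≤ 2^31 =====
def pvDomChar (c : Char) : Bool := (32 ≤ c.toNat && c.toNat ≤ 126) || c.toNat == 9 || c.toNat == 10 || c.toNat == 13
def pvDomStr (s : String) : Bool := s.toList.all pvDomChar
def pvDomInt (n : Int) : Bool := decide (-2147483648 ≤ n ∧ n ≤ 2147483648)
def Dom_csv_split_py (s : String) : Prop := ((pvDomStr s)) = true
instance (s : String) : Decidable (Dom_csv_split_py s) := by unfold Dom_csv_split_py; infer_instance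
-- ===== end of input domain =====

-- B replaces A's per-field character buffers with one pass that records unquoted-comma
-- positions followed by slicing/stripping the segments between them (objective: alternative).

-- ===== PORT A =====
-- the for-loop of _csv_split over state (parts, buf, in_q, qch); qch is only read after
-- in_q has been set to true, at which point it has been assigned, so a Char suffices.
def csvLoopA : List Char → List String → List Char → Bool → Char → List String
  | [], parts, buf, _, _ =>
      if buf ≠ [] then parts ++ [String.ofList (PySem.Chars.strip buf)] else parts
  | ch :: rest, parts, buf, in_q, qch =>
      if in_q then csvLoopA rest parts (buf ++ [ch]) (!(ch == qch)) qch
      else if ch = '"' ∨ ch = '\'' then csvLoopA rest parts (buf ++ [ch]) true ch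
      else if ch = ',' then csvLoopA rest (parts ++ [String.ofList (PySem.Chars.strip buf)]) [] false qch
      else csvLoopA rest parts (buf ++ [ch]) false qch

def csv_split_py (s : String) : List String := csvLoopA s.toList [] [] false ' '

-- ===== PORT B =====
-- first pass: indices of commas seen while not in quotes (same open/close rules)
def csvCuts : List Char → Nat → Bool → Char → List Nat
  | [], _, _, _ => []
  | ch :: rest, i, in_q, qch =>
      if in_q then csvCuts rest (i + 1) (!(ch == qch)) qch
      else if ch = '"' ∨ ch = '\'' then csvCuts rest (i + 1) true ch
      else if ch = ',' then i :: csvCuts rest (i + 1) false qch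
      else csvCuts rest (i + 1) false qch

-- second pass: carve the string at the cut positions; s[prev:c] with 0 ≤ prev ≤ c ≤ len s
-- is exactly (cs.drop prev).take (c - prev) on the char list.
def csvCarve (cs : List Char) : Nat → List Nat → List String
  | prev, [] =>
      if cs.drop prev ≠ [] then [String.ofList (PySem.Chars.strip (cs.drop prev))] else []
  | prev, c :: cuts =>
      String.ofList (PySem.Chars.strip ((cs.drop prev).take (c - prev))) :: csvCarve cs (c + 1) cuts

def csv_split_py_alt (s : String) : List String :=
  csvCarve s.toList 0 (csvCuts s.toList 0 false ' ')

-- ===== PRECONDITION & SPEC =====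
def Spec_csv_split_py (s : String) (out : List String) : Prop := out = csv_split_py_alt s
instance (s : String) (out : List String) : Decidable (Spec_csv_split_py s out) := by unfold Spec_csv_split_py; infer_instance

-- ===== CLAIM (what is proved, stated in full; the proofs are below) =====
def Claim_equal_csv_split_py : Prop := ∀ (s : String), Dom_csv_split_py s → Spec_csv_split_py s (csv_split_py s)

-- ===== LEMMAS AND PROOFS =====

-- A's loop with the `parts` accumulator factored out
def csvSegs : List Char → List Char → Bool → Char → List String
  | [], buf, _, _ =>
      if buf ≠ [] then [String.ofList (PySem.Chars.strip buf)] else []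
  | ch :: rest, buf, in_q, qch =>
      if in_q then csvSegs rest (buf ++ [ch]) (!(ch == qch)) qch
      else if ch = '"' ∨ ch = '\'' then csvSegs rest (buf ++ [ch]) true ch
      else if ch = ',' then String.ofList (PySem.Chars.strip buf) :: csvSegs rest [] false qch
      else csvSegs rest (buf ++ [ch]) false qch

theorem csvLoopA_eq_append (rest : List Char) :
    ∀ (parts : List String) (buf : List Char) (in_q : Bool) (qch : Char),
    csvLoopA rest parts buf in_q qch = parts ++ csvSegs rest buf in_q qch := by
  induction rest with
  | nil => intro parts buf in_q qch
           simp only [csvLoopA, csvSegs]; split_ifs <;> simp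
  | cons ch rest ih =>
      intro parts buf in_q qch
      simp only [csvLoopA, csvSegs]
      split_ifs <;> simp [ih]

theorem csvSegs_eq_carve (rest : List Char) :
    ∀ (cs : List Char) (prev i : Nat) (buf : List Char) (in_q : Bool) (qch : Char),
    prev ≤ i → cs.drop i = rest → (cs.drop prev).take (i - prev) = buf →
    csvSegs rest buf in_q qch = csvCarve cs prev (csvCuts rest i in_q qch) := by
  induction rest with
  | nil =>
      intro cs prev i buf in_q qch hpi hdrop htake
      have hlen : cs.length ≤ i := by
        by_contra h
        have := List.drop_eq_nil_iff.mp hdrop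
        omega
      have hbuf : buf = cs.drop prev := by
        rw [← htake]
        apply List.take_of_length_le
        simp [List.length_drop]; omega
      simp only [csvCuts, csvCarve, hbuf, csvSegs]
  | cons ch rest ih =>
      intro cs prev i buf in_q qch hpi hdrop htake
      have hi : i < cs.length := by
        by_contra h
        have : cs.drop i = [] := List.drop_eq_nil_iff.mpr (by omega)
        rw [this] at hdrop; exact (List.cons_ne_nil _ _ hdrop.symm).elim
      have hget : cs[i]? = some ch := by
        have : (cs.drop i)[0]? = some ch := by rw [hdrop]; rfl
        rwa [List.getElem?_drop, Nat.add_zero] at this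
      have hrest : cs.drop (i + 1) = rest := by
        have : (cs.drop i).tail = rest := by rw [hdrop]; rfl
        rw [← List.drop_one, List.drop_drop] at this; exact this
      have htake' : (cs.drop prev).take (i + 1 - prev) = buf ++ [ch] := by
        have h1 : i + 1 - prev = (i - prev) + 1 := by omega
        rw [h1, List.take_add_one, htake, List.getElem?_drop]
        have h2 : prev + (i - prev) = i := by omega
        rw [h2, hget]; rfl
      simp only [csvSegs, csvCuts]
      split_ifs with h1 h2 h3
      · exact ih cs prev (i + 1) _ _ _ (by omega) hrest htake'
      · exact ih cs prev (i + 1) _ _ _ (by omega) hrest htake'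
      · simp only [csvCarve, htake]
        refine congrArg _ ?_
        exact ih cs (i + 1) (i + 1) [] _ _ (by omega) hrest (by simp)
      · exact ih cs prev (i + 1) _ _ _ (by omega) hrest htake'

-- ===== VERDICT (by name: the statement is the Claim_ definition above) =====
theorem csv_split_py_spec : Claim_equal_csv_split_py := by
  intro s _
  show csv_split_py s = csv_split_py_alt s
  unfold csv_split_py csv_split_py_alt
  rw [csvLoopA_eq_append]
  simpa using csvSegs_eq_carve s.toList s.toList 0 0 [] false ' ' (by omega) (by simp) (by simp)
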